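-- pv_equiv track=rewrite | github.com/Ethan136/Python-C-Struct-Converter | src/model/struct_model.py | _is_top_level_position
-- ===== SOURCE A (Python) =====
-- def _is_top_level_position(text: str, position: int) -> bool:
--     """檢查 position 之前的 brace 深度是否為 0（忽略 // 行註解）。"""
--     depth = 0
--     in_line_comment = False
--     i = 0
--     while i < position:
--         ch = text[i]
--         if in_line_comment:
--             if ch == '\n':
--                 in_line_comment = False
--             i += 1
--             continue
--         if ch == '/' and i + 1 < position and text[i+1] == '/':
--             in_line_comment = True
--             i += 2
--             continue
--         if ch == '{':
--             depth += 1
--         elif ch == '}':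
--             depth = max(0, depth - 1)
--         i += 1
--     return depth == 0
-- ===== SOURCE B (Python) =====
-- def _is_top_level_position(text: str, position: int) -> bool:
--     depth = 0
--     for line in text[:max(0, position)].split('\n'):
--         idx = line.find('//')
--         if idx != -1:
--             line = line[:idx]
--         for ch in line:
--             if ch == '{':
--                 depth += 1
--             elif ch == '}':
--                 depth = max(0, depth - 1)
--     return depth == 0
-- ===== Notes on version B (the rewrite author's own statement) =====
-- stated objective: simpler
-- what changed: Replaces the index-based scanner with its in_line_comment flag and manual two-character lookahead by slicing text[:max(0,position)], splitting it into lines, cutting each line at its first '//' with str.find, and folding the brace depth over the remaining characters. (str.split/str.find do the scanning in C instead of a per-character Python loop)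
import Mathlib
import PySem

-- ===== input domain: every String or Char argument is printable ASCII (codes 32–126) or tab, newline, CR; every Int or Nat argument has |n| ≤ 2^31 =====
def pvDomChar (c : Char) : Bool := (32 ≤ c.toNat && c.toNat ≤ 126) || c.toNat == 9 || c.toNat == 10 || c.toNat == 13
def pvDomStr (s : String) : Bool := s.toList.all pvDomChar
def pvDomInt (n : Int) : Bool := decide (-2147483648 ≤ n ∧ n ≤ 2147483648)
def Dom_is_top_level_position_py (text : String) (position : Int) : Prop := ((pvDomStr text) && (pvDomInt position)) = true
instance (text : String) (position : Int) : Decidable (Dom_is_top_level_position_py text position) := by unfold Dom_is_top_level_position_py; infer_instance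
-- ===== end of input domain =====

-- B replaces A's index scanner (comment flag + manual lookahead) by slicing text[:position],
-- splitting into lines, cutting each line at its first '//' and folding the clamped brace depth
-- over the remaining characters (objective: simpler).

-- ===== PORT A =====
-- the while-loop of A: state (depth, in_line_comment, i); index accesses via pyGet?
-- (a `none` from pyGet? is Python's IndexError — those inputs are outside Pre_).
def aLoop (cs : List Char) (position : Int) (depth : Int) (inComment : Bool) (i : Int) : Bool :=
  if _h : i < position then
    match PySem.List.pyGet? cs i with
    | none => false   -- Python raises IndexError here (excluded by Pre_)
    | some ch =>
      if inComment then
        aLoop cs position depth (if ch = '\n' then false else inComment) (i + 1)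
      else if ch = '/' ∧ i + 1 < position ∧ PySem.List.pyGet? cs (i + 1) = some '/' then
        aLoop cs position depth true (i + 2)
      else if ch = '{' then
        aLoop cs position (depth + 1) inComment (i + 1)
      else if ch = '}' then
        aLoop cs position (max 0 (depth - 1)) inComment (i + 1)
      else
        aLoop cs position depth inComment (i + 1)
  else
    decide (depth = 0)
termination_by (position - i).toNat
decreasing_by all_goals omega

def is_top_level_position_py (text : String) (position : Int) : Bool :=
  aLoop text.toList position 0 false 0

-- ===== PORT B =====
-- per-line body of Source B's for-loop: cut the line at its first '//' (line.find), fold the depth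
def bLine (depth : Int) (line : List Char) : Int :=
  let idx := PySem.Chars.find line ['/', '/']
  let line' := if idx ≠ -1 then PySem.List.slice line none (some idx) else line
  line'.foldl (fun d ch => if ch = '{' then d + 1 else if ch = '}' then max 0 (d - 1) else d) depth

-- text[:position].split('\n') = Chars.splitOn on the code points (sep ≠ "")
def is_top_level_position_py_alt (text : String) (position : Int) : Bool :=
  decide ((PySem.Chars.splitOn (PySem.List.slice text.toList none (some (max 0 position))) ['\n']).foldl bLine 0 = 0)

-- ===== PRECONDITION & SPEC =====
-- Pre_ excludes exactly the inputs where A raises IndexError (position > len(text)).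
def Pre_is_top_level_position_py (text : String) (position : Int) : Prop :=
  position ≤ (text.toList.length : Int)
instance (text : String) (position : Int) : Decidable (Pre_is_top_level_position_py text position) := by
  unfold Pre_is_top_level_position_py; infer_instance

def pvWitness_is_top_level_position_py : String × Int := ("{x\n}", 3)

def Spec_is_top_level_position_py (text : String) (position : Int) (out : Bool) : Prop :=
  out = is_top_level_position_py_alt text position
instance (text : String) (position : Int) (out : Bool) : Decidable (Spec_is_top_level_position_py text position out) := by
  unfold Spec_is_top_level_position_py; infer_instance

-- ===== CLAIM (what is proved, stated in full; the proofs are below) =====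
def Claim_equal_is_top_level_position_py : Prop := ∀ (text : String) (position : Int), Dom_is_top_level_position_py text position → Pre_is_top_level_position_py text position → Spec_is_top_level_position_py text position (is_top_level_position_py text position)

-- ===== LEMMAS AND PROOFS =====

-- the character-level depth update shared by the reasoning
def stepD (d : Int) (c : Char) : Int :=
  if c = '{' then d + 1 else if c = '}' then max 0 (d - 1) else d

-- A's scanner as a machine over the list of characters before position
def machA : List Char → Int → Bool → Int
  | [], d, _ => d
  | c :: rest, d, inc =>
    if inc then machA rest d (decide (c ≠ '\n'))
    else if c = '/' ∧ rest.head? = some '/' then machA rest.tail d true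
    else machA rest (stepD d c) false
termination_by l => l.length
decreasing_by all_goals (simp only [List.length_tail, List.length_cons]; omega)

-- cut a line at its first '//'
def cutDS : List Char → List Char
  | [] => []
  | c :: rest => if c = '/' ∧ rest.head? = some '/' then [] else c :: cutDS rest

-- reference split on '\n'
def mySplit : List Char → List (List Char)
  | [] => [[]]
  | c :: rest =>
    if c = '\n' then [] :: mySplit rest
    else (c :: (mySplit rest).headI) :: (mySplit rest).tail

def foldLines (d : Int) (ls : List (List Char)) : Int :=
  ls.foldl (fun d l => (cutDS l).foldl stepD d) d

lemma mySplit_ne_nil (l : List Char) : mySplit l ≠ [] := by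
  cases l with
  | nil => simp [mySplit]
  | cons c rest => simp only [mySplit]; split <;> simp

lemma mySplit_headI_head? (l : List Char) :
    ((mySplit l).headI).head? = if l.head? = some '\n' then none else l.head? := by
  cases l with
  | nil => simp [mySplit]
  | cons c rest => by_cases h : c = '\n' <;> simp [mySplit, h]

lemma headI_tail {α : Type} [Inhabited α] (l : List α) (h : l ≠ []) : l.headI :: l.tail = l := by
  cases l with
  | nil => exact absurd rfl h
  | cons a t => rfl

lemma mySplit_tail_cons (c : Char) (l : List Char) (h : c ≠ '\n') :
    (mySplit (c :: l)).tail = (mySplit l).tail := by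
  simp [mySplit, h]

lemma splitOn_go_eq (l : List Char) : ∀ (fuel : Nat) (cur : List Char) (acc : List (List Char)),
    l.length < fuel →
    PySem.Chars.splitOn.go ['\n'] fuel l cur acc
      = acc.reverse ++ (cur.reverse ++ (mySplit l).headI) :: (mySplit l).tail := by
  induction l with
  | nil =>
    intro fuel cur acc h
    cases fuel with
    | zero => omega
    | succ f => simp [PySem.Chars.splitOn.go, mySplit]
  | cons c rest ih =>
    intro fuel cur acc h
    cases fuel with
    | zero => omega
    | succ f =>
      by_cases hc : c = '\n'
      · subst hc
        rw [PySem.Chars.splitOn.go]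
        have hp : List.isPrefixOf ['\n'] ('\n' :: rest) = true := by
          simp [List.isPrefixOf]
        rw [if_pos hp]
        simp only [List.length_singleton, List.drop_succ_cons, List.drop_zero]
        rw [ih f [] (cur.reverse :: acc) (by simp at h; omega)]
        simp [mySplit, headI_tail _ (mySplit_ne_nil rest)]
      · rw [PySem.Chars.splitOn.go]
        have hp : List.isPrefixOf ['\n'] (c :: rest) = false := by
          simp [List.isPrefixOf]
          exact fun he => hc he.symm
        rw [if_neg (by rw [hp]; simp)]
        rw [ih f (c :: cur) acc (by simpa using Nat.lt_of_succ_lt_succ h)]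
        simp [mySplit, hc]

lemma splitOn_eq_mySplit (l : List Char) : PySem.Chars.splitOn l ['\n'] = mySplit l := by
  rw [PySem.Chars.splitOn, splitOn_go_eq l (l.length + 1) [] [] (by omega)]
  simp [headI_tail _ (mySplit_ne_nil l)]

lemma cutDS_of_not_infix (l : List Char) (h : ¬ ['/', '/'] <:+: l) : cutDS l = l := by
  induction l with
  | nil => rfl
  | cons c rest ih =>
    have hc : ¬ (c = '/' ∧ rest.head? = some '/') := by
      rintro ⟨rfl, hh⟩
      cases rest with
      | nil => simp at hh
      | cons r t =>
        simp at hh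
        exact h ⟨[], t, by simp [hh]⟩
    rw [cutDS, if_neg hc, ih (fun hi => h (hi.trans (List.suffix_cons c rest).isInfix))]

lemma cutDS_eq_take (l : List Char) : ∀ (j : Nat), ['/', '/'] <+: l.drop j →
    (∀ i < j, ¬ ['/', '/'] <+: l.drop i) → cutDS l = l.take j := by
  induction l with
  | nil => intro j h _; simp at h
  | cons c rest ih =>
    intro j h hmin
    cases j with
    | zero =>
      simp only [List.drop_zero] at h
      obtain ⟨t, ht⟩ := h
      cases rest with
      | nil => simp at ht
      | cons r tl =>
        simp at ht
        rw [cutDS, if_pos ⟨ht.1.symm, by simp [ht.2.1.symm]⟩]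
        simp
    | succ k =>
      have h0 : ¬ (c = '/' ∧ rest.head? = some '/') := by
        rintro ⟨rfl, hh⟩
        cases rest with
        | nil => simp at hh
        | cons r t =>
          simp at hh
          exact hmin 0 (by omega) ⟨t, by simp [hh]⟩
      rw [cutDS, if_neg h0, List.take_succ_cons,
        ih k (by simpa using h) (fun i hi => by simpa using hmin (i+1) (by omega))]

lemma bLine_eq (d : Int) (l : List Char) : bLine d l = (cutDS l).foldl stepD d := by
  show (if PySem.Chars.find l ['/', '/'] ≠ -1
      then PySem.List.slice l none (some (PySem.Chars.find l ['/', '/'])) else l).foldl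
    (fun d ch => if ch = '{' then d + 1 else if ch = '}' then max 0 (d - 1) else d) d
    = (cutDS l).foldl stepD d
  by_cases h : ['/', '/'] <:+: l
  · have hnn : 0 ≤ PySem.Chars.find l ['/', '/'] := (PySem.Chars.find_nonneg_iff l _).mpr h
    have hne : PySem.Chars.find l ['/', '/'] ≠ -1 := by omega
    obtain ⟨h1, h2⟩ := PySem.Chars.find_spec hnn
    rw [if_pos hne, PySem.List.slice_to l hnn,
      cutDS_eq_take l (PySem.Chars.find l ['/', '/']).toNat h1 h2]
    rfl
  · have hne : PySem.Chars.find l ['/', '/'] = -1 := (PySem.Chars.find_eq_neg_one_iff l _).mpr h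
    rw [if_neg (by simp [hne]), cutDS_of_not_infix l h]
    rfl

lemma foldl_bLine_eq (ls : List (List Char)) : ∀ d : Int, ls.foldl bLine d = foldLines d ls := by
  induction ls with
  | nil => intro d; simp [foldLines]
  | cons l ls ih => intro d; simp only [List.foldl_cons, foldLines] at *; rw [bLine_eq, ih]

lemma foldLines_cons (d : Int) (l : List Char) (ls : List (List Char)) :
    foldLines d (l :: ls) = foldLines ((cutDS l).foldl stepD d) ls := rfl

lemma machA_eq (n : Nat) : ∀ p : List Char, p.length ≤ n →
    (∀ d, machA p d false = foldLines d (mySplit p)) ∧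
    (∀ d, machA p d true = foldLines d (mySplit p).tail) := by
  induction n with
  | zero =>
    intro p hp
    have : p = [] := List.length_eq_zero_iff.mp (Nat.le_zero.mp hp)
    subst this
    constructor <;> intro d <;> simp [machA, mySplit, foldLines, cutDS]
  | succ n ih =>
    intro p hp
    cases p with
    | nil => constructor <;> intro d <;> simp [machA, mySplit, foldLines, cutDS]
    | cons c rest =>
      have hrest := ih rest (by simpa using Nat.le_of_succ_le_succ hp)
      constructor
      · intro d
        rw [machA, if_neg (by simp)]
        by_cases hcom : c = '/' ∧ rest.head? = some '/'
        · rw [if_pos hcom]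
          obtain ⟨hc, hh⟩ := hcom
          cases rest with
          | nil => simp at hh
          | cons r rtl =>
            simp at hh
            have htl := (ih rtl (by simp at hp; omega)).2
            rw [List.tail_cons, htl d]
            -- RHS: mySplit (c :: r :: rtl); c = '/', r = '/'
            subst hc hh
            rw [show mySplit ('/' :: '/' :: rtl)
                = ('/' :: (mySplit ('/' :: rtl)).headI) :: (mySplit ('/' :: rtl)).tail from by
              simp [mySplit]]
            rw [foldLines_cons]
            have hcut : cutDS ('/' :: (mySplit ('/' :: rtl)).headI) = [] := by
              rw [cutDS, if_pos]
              refine ⟨rfl, ?_⟩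
              rw [mySplit_headI_head?]
              simp
            rw [hcut]
            simp only [List.foldl_nil]
            rw [mySplit_tail_cons _ _ (by decide)]
        · rw [if_neg hcom]
          by_cases hnl : c = '\n'
          · subst hnl
            rw [show mySplit ('\n' :: rest) = [] :: mySplit rest from by simp [mySplit]]
            rw [foldLines_cons]
            have hst : stepD d '\n' = d := by simp [stepD]
            rw [hst, hrest.1 d]
            simp [cutDS]
          · rw [(hrest).1 (stepD d c)]
            rw [show mySplit (c :: rest)
                = (c :: (mySplit rest).headI) :: (mySplit rest).tail from by simp [mySplit, hnl]]
            rw [foldLines_cons]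
            have hcut : cutDS (c :: (mySplit rest).headI)
                = c :: cutDS (mySplit rest).headI := by
              rw [cutDS, if_neg]
              rintro ⟨rfl, hh⟩
              rw [mySplit_headI_head?] at hh
              apply hcom
              refine ⟨rfl, ?_⟩
              by_cases h2 : rest.head? = some '\n'
              · rw [if_pos h2] at hh; exact absurd hh (by simp)
              · rwa [if_neg h2] at hh
            rw [hcut]
            simp only [List.foldl_cons]
            conv_lhs => rw [← headI_tail _ (mySplit_ne_nil rest)]
            rw [foldLines_cons]
      · intro d
        rw [machA, if_pos rfl]
        by_cases hnl : c = '\n'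
        · subst hnl
          rw [show (decide ('\n' ≠ '\n')) = false from by decide, hrest.1 d]
          rw [show mySplit ('\n' :: rest) = [] :: mySplit rest from by simp [mySplit]]
          rfl
        · rw [show (decide (c ≠ '\n')) = true from by simp [hnl], hrest.2 d]
          rw [mySplit_tail_cons _ _ hnl]


lemma aLoop_eq (cs : List Char) (pos : Int) (hpos : pos ≤ (cs.length : Int)) :
    ∀ (k : Nat) (i : Int), 0 ≤ i → (pos - i).toNat = k → ∀ (d : Int) (inc : Bool),
    aLoop cs pos d inc i = decide (machA ((cs.take pos.toNat).drop i.toNat) d inc = 0) := by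
  intro k
  induction k using Nat.strong_induction_on with
  | _ k ih =>
    intro i h0 hk d inc
    rw [aLoop]
    by_cases hi : i < pos
    · rw [dif_pos hi]
      have hiN : i.toNat < pos.toNat := by omega
      have hlen : pos.toNat ≤ cs.length := by omega
      have hiL : i.toNat < cs.length := by omega
      have htakelen : i.toNat < (cs.take pos.toNat).length := by
        simp [List.length_take]; omega
      have hget : PySem.List.pyGet? cs i = cs[i.toNat]? := by
        conv_lhs => rw [show i = ((i.toNat : Nat) : Int) from by omega]
        exact PySem.List.pyGet?_natCast cs i.toNat
      have hget2 : PySem.List.pyGet? cs i = some (cs[i.toNat]'hiL) :=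
        hget.trans (List.getElem?_eq_getElem hiL)
      have hdrop : (cs.take pos.toNat).drop i.toNat
          = cs[i.toNat]'hiL :: (cs.take pos.toNat).drop (i.toNat + 1) := by
        rw [List.drop_eq_getElem_cons htakelen]
        congr 1
        exact List.getElem_take
      simp only [hget2, hdrop]
      have hi1 : (i + 1).toNat = i.toNat + 1 := by omega
      have hi2 : (i + 2).toNat = i.toNat + 2 := by omega
      cases inc with
      | true =>
        rw [machA, if_pos rfl,
          ih (pos - (i+1)).toNat (by omega) (i+1) (by omega) rfl _ _, hi1]
        by_cases hnl : cs[i.toNat]'hiL = '\n' <;> simp [hnl]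
      | false =>
        rw [machA, if_neg (by simp)]
        have hh : ((cs.take pos.toNat).drop (i.toNat + 1)).head?
            = if i.toNat + 1 < pos.toNat then cs[i.toNat + 1]? else none := by
          rw [List.head?_drop, List.getElem?_take]
        have hg1 : PySem.List.pyGet? cs (i + 1) = cs[i.toNat + 1]? := by
          conv_lhs => rw [show i + 1 = ((i.toNat + 1 : Nat) : Int) from by omega]
          exact PySem.List.pyGet?_natCast cs (i.toNat + 1)
        have hcond : (cs[i.toNat]'hiL = '/' ∧ i + 1 < pos
              ∧ PySem.List.pyGet? cs (i + 1) = some '/')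
            ↔ (cs[i.toNat]'hiL = '/'
              ∧ ((cs.take pos.toNat).drop (i.toNat + 1)).head? = some '/') := by
          rw [hh, hg1]
          constructor
          · rintro ⟨h1, h2, h3⟩
            exact ⟨h1, by rw [if_pos (by omega)]; exact h3⟩
          · rintro ⟨h1, h2⟩
            by_cases hlt : i.toNat + 1 < pos.toNat
            · rw [if_pos hlt] at h2
              exact ⟨h1, by omega, h2⟩
            · rw [if_neg hlt] at h2; exact absurd h2 (by simp)
        by_cases hca : cs[i.toNat]'hiL = '/' ∧ i + 1 < pos
            ∧ PySem.List.pyGet? cs (i + 1) = some '/'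
        · rw [if_pos hca, if_pos (hcond.mp hca), List.tail_drop,
            ih (pos - (i+2)).toNat (by omega) (i+2) (by omega) rfl _ _, hi2]
          norm_num
        · rw [if_neg hca, if_neg (fun hcm => hca (hcond.mpr hcm))]
          by_cases hbr : cs[i.toNat]'hiL = '{'
          · rw [if_pos hbr,
              ih (pos - (i+1)).toNat (by omega) (i+1) (by omega) rfl _ _, hi1]
            simp [stepD, hbr]
          · rw [if_neg hbr]
            by_cases hbr2 : cs[i.toNat]'hiL = '}'
            · rw [if_pos hbr2,
                ih (pos - (i+1)).toNat (by omega) (i+1) (by omega) rfl _ _, hi1]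
              simp [stepD, hbr2]
            · rw [if_neg hbr2,
                ih (pos - (i+1)).toNat (by omega) (i+1) (by omega) rfl _ _, hi1]
              simp [stepD, hbr, hbr2]
    · rw [dif_neg hi]
      have : (cs.take pos.toNat).drop i.toNat = [] := by
        apply List.drop_eq_nil_of_le
        simp [List.length_take]; omega
      rw [this, machA]


-- ===== VERDICT (by name: the statement is the Claim_ definition above) =====
theorem is_top_level_position_py_spec : Claim_equal_is_top_level_position_py := by
  intro text position _ hpre
  unfold Spec_is_top_level_position_py is_top_level_position_py is_top_level_position_py_alt
  by_cases h0 : 0 ≤ position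
  · rw [aLoop_eq text.toList position hpre (position - 0).toNat 0 le_rfl rfl 0 false]
    rw [show max 0 position = position from by omega,
      PySem.List.slice_to text.toList h0, splitOn_eq_mySplit, foldl_bLine_eq]
    simp [(machA_eq (text.toList.take position.toNat).length _ le_rfl).1]
  · rw [aLoop, dif_neg (by omega), show max 0 position = (0 : Int) from by omega,
      PySem.List.slice_to text.toList le_rfl]
    rw [splitOn_eq_mySplit]
    norm_num [mySplit, bLine_eq, cutDS]
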